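-- pv_equiv track=rewrite | github.com/Arnalguibbert/Mitroglou_le_retour | game/game_connect4.py | allignement_colonne
-- ===== SOURCE A (Python) =====
-- def allignement_colonne(game_grid):
--     """ vérifie si il y a 4 cases identiques sur une colonne et si c'est le cas, renvoie True"""
--     size = len(game_grid)
--     for position in range(0,size):
--         colonne_string = "" #on commence par créer la string de la colonne
--         for couche in range(0,size):
--             colonne_string += game_grid[couche][position]
--         if "0000" in colonne_string or "1111" in colonne_string:
--             return True
--     return False
-- ===== SOURCE B (Python) =====
-- def allignement_colonne(game_grid):
--     """True iff a column contains four consecutive identical player pieces ('0' or '1')."""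
--     size = len(game_grid)
--     for position in range(size):
--         column = "".join(game_grid[couche][position] for couche in range(size))
--         run = 0
--         prev = ""
--         for ch in column:
--             run = run + 1 if ch == prev else 1
--             prev = ch
--             if run >= 4 and ch in "01":
--                 return True
--     return False
-- ===== Notes on version B (the rewrite author's own statement) =====
-- stated objective: alternative
-- what changed: B replaces A's substring search ('0000' in column or '1111' in column) by a single run-length counting pass over the column that returns True as soon as four consecutive equal player characters appear; Pre_ excludes only the inputs on which A raises IndexError (a row shorter than the grid height reached before any winning column).
import Mathlib
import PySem

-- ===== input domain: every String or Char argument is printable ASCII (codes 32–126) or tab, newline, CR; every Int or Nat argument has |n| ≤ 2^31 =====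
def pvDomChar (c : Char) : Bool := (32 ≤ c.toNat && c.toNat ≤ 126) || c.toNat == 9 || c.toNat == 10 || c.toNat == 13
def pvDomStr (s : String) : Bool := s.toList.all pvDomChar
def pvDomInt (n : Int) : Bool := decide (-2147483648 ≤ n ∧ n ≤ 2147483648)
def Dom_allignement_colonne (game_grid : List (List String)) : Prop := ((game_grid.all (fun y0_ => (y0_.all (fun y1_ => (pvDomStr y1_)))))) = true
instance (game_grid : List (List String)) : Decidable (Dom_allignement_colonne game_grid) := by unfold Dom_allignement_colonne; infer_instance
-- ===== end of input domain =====

-- B replaces A's substring search over each column string by a single run-length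
-- counting pass over it (objective: alternative algorithm, same asymptotic cost).

-- ===== PORT A =====
-- inner loop: colonne_string += game_grid[couche][position]  (kept as List Char)
def pvAcolonneString (game_grid : List (List String)) (position : Int) : List Char :=
  (PySem.List.pyRange 0 game_grid.length 1).foldl
    (fun acc couche =>
      acc ++ (PySem.List.pyGetD (PySem.List.pyGetD game_grid couche []) position "").toList)
    []

def allignement_colonne (game_grid : List (List String)) : Bool :=
  (PySem.List.pyRange 0 game_grid.length 1).any (fun position =>
    let colonne_string := pvAcolonneString game_grid position
    PySem.Chars.isIn "0000".toList colonne_string || PySem.Chars.isIn "1111".toList colonne_string)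

-- ===== PORT B =====
-- Source B's inner loop: carry (prev, run) over the column's characters, True at a run of 4 '0'/'1'
def pvScanChars : List Char → Option Char → Nat → Bool
  | [], _, _ => false
  | c :: cs, prev, run =>
    let run' := if some c = prev then run + 1 else 1
    if 4 ≤ run' ∧ (c = '0' ∨ c = '1') then true
    else pvScanChars cs (some c) run'

-- column = "".join(game_grid[couche][position] for couche in range(size))
def pvBcolumnChars (game_grid : List (List String)) (position : Int) : List Char :=
  (PySem.List.pyRange 0 game_grid.length 1).flatMap
    (fun couche => (PySem.List.pyGetD (PySem.List.pyGetD game_grid couche []) position "").toList)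

def allignement_colonne_alt (game_grid : List (List String)) : Bool :=
  (PySem.List.pyRange 0 game_grid.length 1).any (fun position =>
    pvScanChars (pvBcolumnChars game_grid position) none 0)

-- ===== PRECONDITION & SPEC =====
-- Exactly the inputs on which the Python A returns (no IndexError): either every row is at
-- least as long as the grid height, or some column present in every row already contains four
-- consecutive identical '0'/'1' characters, so A returns True before reaching any short row.
def Pre_allignement_colonne (game_grid : List (List String)) : Prop :=
  (∀ row ∈ game_grid, game_grid.length ≤ row.length) ∨
  (∃ p ∈ List.range ((game_grid.map List.length).foldr max 0),
     (∀ row ∈ game_grid, p < row.length) ∧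
     ((List.replicate 4 '0' <:+: game_grid.flatMap (fun row => (row.getD p "").toList)) ∨
      (List.replicate 4 '1' <:+: game_grid.flatMap (fun row => (row.getD p "").toList))))
instance (game_grid : List (List String)) : Decidable (Pre_allignement_colonne game_grid) := by
  unfold Pre_allignement_colonne; infer_instance

def pvWitness_allignement_colonne : List (List String) :=
  [["0", "1"], ["0", "1"]]

def Spec_allignement_colonne (game_grid : List (List String)) (out : Bool) : Prop := out = allignement_colonne_alt game_grid
instance (game_grid : List (List String)) (out : Bool) : Decidable (Spec_allignement_colonne game_grid out) := by unfold Spec_allignement_colonne; infer_instance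

-- ===== CLAIM (what is proved, stated in full; the proofs are below) =====
def Claim_equal_allignement_colonne : Prop := ∀ (game_grid : List (List String)), Dom_allignement_colonne game_grid → Pre_allignement_colonne game_grid → Spec_allignement_colonne game_grid (allignement_colonne game_grid)

-- ===== LEMMAS AND PROOFS =====

-- both ports traverse the same column characters
lemma pvAcol_eq_Bcol (game_grid : List (List String)) (position : Int) :
    pvAcolonneString game_grid position = pvBcolumnChars game_grid position := by
  unfold pvAcolonneString pvBcolumnChars
  simpa using PySem.List.foldl_append_eq_flatMap
    (l := PySem.List.pyRange 0 game_grid.length 1)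
    (g := fun couche => (PySem.List.pyGetD (PySem.List.pyGetD game_grid couche []) position "").toList)
    (acc := [])

lemma pvRepl_prefix_cons (k : Nat) (c c0 : Char) (rest : List Char) :
    List.replicate (k + 1) c <+: c0 :: rest ↔ c = c0 ∧ List.replicate k c <+: rest := by
  simp [List.replicate_succ, List.cons_prefix_cons]

lemma pvRepl_prefix_repl (c : Char) (k : Nat) (h : 4 ≤ k) :
    List.replicate 4 c <+: List.replicate k c := by
  refine ⟨List.replicate (k - 4) c, ?_⟩
  rw [← List.replicate_add]; congr 1; omega

-- full characterisation of the scanner, for any carried (prev, run) state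
lemma pvScanChars_iff (cs : List Char) : ∀ (prev : Option Char) (run : Nat),
    pvScanChars cs prev run = true ↔
      ((∃ c, prev = some c ∧ (c = '0' ∨ c = '1') ∧
          ∃ k : Nat, 0 < k ∧ 4 ≤ run + k ∧ List.replicate k c <+: cs)
        ∨ (∃ c, (c = '0' ∨ c = '1') ∧ List.replicate 4 c <:+: cs)) := by
  induction cs with
  | nil =>
    intro prev run
    constructor
    · intro h; simp [pvScanChars] at h
    · rintro (⟨c, -, -, k, hk, -, hpre⟩ | ⟨c, -, hinf⟩)
      · rw [List.prefix_nil, List.replicate_eq_nil_iff] at hpre; omega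
      · rw [List.infix_nil, List.replicate_eq_nil_iff] at hinf; omega
  | cons c0 rest ih =>
    intro prev run
    simp only [pvScanChars]
    by_cases hp : some c0 = prev
    · rw [if_pos hp]
      by_cases hhit : 4 ≤ run + 1 ∧ (c0 = '0' ∨ c0 = '1')
      · rw [if_pos hhit]
        refine ⟨fun _ => Or.inl ⟨c0, hp.symm, hhit.2, 1, Nat.one_pos, by omega, by simp⟩,
                fun _ => rfl⟩
      · rw [if_neg hhit, ih (some c0) (run + 1)]
        constructor
        · rintro (⟨c, hc, h01, k, hk, h4, hpre⟩ | ⟨c, h01, hinf⟩)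
          · obtain rfl : c0 = c := by injection hc
            exact Or.inl ⟨c0, hp.symm, h01, k + 1, by omega, by omega,
              (pvRepl_prefix_cons k c0 c0 rest).mpr ⟨rfl, hpre⟩⟩
          · exact Or.inr ⟨c, h01, List.infix_cons hinf⟩
        · rintro (⟨c, hc, h01, k, hk, h4, hpre⟩ | ⟨c, h01, hinf⟩)
          · obtain rfl : c0 = c := by rw [← hp] at hc; injection hc
            obtain ⟨k', rfl⟩ : ∃ k', k = k' + 1 := ⟨k - 1, by omega⟩
            obtain ⟨-, hpre'⟩ := (pvRepl_prefix_cons k' c0 c0 rest).mp hpre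
            rcases Nat.eq_zero_or_pos k' with rfl | hk'
            · exact absurd ⟨by omega, h01⟩ hhit
            · exact Or.inl ⟨c0, rfl, h01, k', hk', by omega, hpre'⟩
          · rcases List.infix_cons_iff.mp hinf with hpre | hinf'
            · obtain ⟨rfl, hpre'⟩ := (pvRepl_prefix_cons 3 c c0 rest).mp hpre
              exact Or.inl ⟨c, rfl, h01, 3, by omega, by omega, hpre'⟩
            · exact Or.inr ⟨c, h01, hinf'⟩
    · rw [if_neg hp, if_neg (by omega : ¬ (4 ≤ 1 ∧ (c0 = '0' ∨ c0 = '1'))), ih (some c0) 1]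
      constructor
      · rintro (⟨c, hc, h01, k, hk, h4, hpre⟩ | ⟨c, h01, hinf⟩)
        · obtain rfl : c0 = c := by injection hc
          refine Or.inr ⟨c0, h01, List.IsPrefix.isInfix ?_⟩
          exact (pvRepl_prefix_repl c0 (k + 1) (by omega)).trans
            ((pvRepl_prefix_cons k c0 c0 rest).mpr ⟨rfl, hpre⟩)
        · exact Or.inr ⟨c, h01, List.infix_cons hinf⟩
      · rintro (⟨c, hc, h01, k, hk, h4, hpre⟩ | ⟨c, h01, hinf⟩)
        · obtain ⟨k', rfl⟩ : ∃ k', k = k' + 1 := ⟨k - 1, by omega⟩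
          obtain ⟨rfl, -⟩ := (pvRepl_prefix_cons k' c c0 rest).mp hpre
          exact absurd hc.symm hp
        · rcases List.infix_cons_iff.mp hinf with hpre | hinf'
          · obtain ⟨rfl, hpre'⟩ := (pvRepl_prefix_cons 3 c c0 rest).mp hpre
            exact Or.inl ⟨c, rfl, h01, 3, by omega, by omega, hpre'⟩
          · exact Or.inr ⟨c, h01, hinf'⟩

lemma pvScan_from_start (cs : List Char) :
    pvScanChars cs none 0 = true ↔
      ∃ c, (c = '0' ∨ c = '1') ∧ List.replicate 4 c <:+: cs := by
  rw [pvScanChars_iff]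
  exact ⟨fun h => h.resolve_left (by rintro ⟨c, hc, -⟩; simp at hc), Or.inr⟩

lemma pvCol_pointwise (cs : List Char) :
    (PySem.Chars.isIn "0000".toList cs || PySem.Chars.isIn "1111".toList cs)
      = pvScanChars cs none 0 := by
  have e0 : "0000".toList = List.replicate 4 '0' := by decide
  have e1 : "1111".toList = List.replicate 4 '1' := by decide
  by_cases h : ∃ c, (c = '0' ∨ c = '1') ∧ List.replicate 4 c <:+: cs
  · rw [(pvScan_from_start cs).mpr h]
    obtain ⟨c, h01, hinf⟩ := h
    rcases h01 with rfl | rfl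
    · rw [(PySem.Chars.isIn_iff_infix _ _).mpr (e0 ▸ hinf : "0000".toList <:+: cs)]; rfl
    · rw [(PySem.Chars.isIn_iff_infix _ _).mpr (e1 ▸ hinf : "1111".toList <:+: cs), Bool.or_true]
  · have hs : pvScanChars cs none 0 = false :=
      Bool.not_eq_true _ ▸ (fun hc => h ((pvScan_from_start cs).mp hc))
    rw [hs,
      (PySem.Chars.isIn_eq_false_iff _ _).mpr (fun hi => h ⟨'0', Or.inl rfl, e0 ▸ hi⟩),
      (PySem.Chars.isIn_eq_false_iff _ _).mpr (fun hi => h ⟨'1', Or.inr rfl, e1 ▸ hi⟩)]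
    rfl

-- ===== VERDICT (by name: the statement is the Claim_ definition above) =====
theorem allignement_colonne_spec : Claim_equal_allignement_colonne := by
  intro game_grid _ _
  unfold Spec_allignement_colonne allignement_colonne allignement_colonne_alt
  refine List.any_congr rfl (fun p => ?_)
  simp only []
  rw [pvAcol_eq_Bcol]
  exact pvCol_pointwise _
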